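-- pv_equiv track=rewrite | github.com/Arize-ai/phoenix | src/phoenix/trace/otel.py | _consolidate_flattened_prefixed_indexed_keys_into_list
-- ===== SOURCE A (Python) =====
-- from collections import defaultdict
-- from typing import (
--     Any,
--     DefaultDict,
--     Dict,
--     Hashable,
--     Iterable,
--     Iterator,
--     List,
--     Mapping,
--     Optional,
--     Sequence,
--     Set,
--     Tuple,
--     cast,
-- )
--
-- def _extract_sub_key(key: str, prefix: str) -> Optional[str]:
--     prefix_dot = f"{prefix}."
--     if not (len(prefix_dot) < len(key) and key.startswith(prefix_dot)):
--         return None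
--     return key[len(prefix_dot) :]
--
-- def _extract_index_and_sub_key(key: str, prefix: str) -> Optional[Tuple[int, str]]:
--     indexed_sub_key = _extract_sub_key(key, prefix)
--     if not indexed_sub_key:
--         return None
--     dot_idx = indexed_sub_key.find(".")
--     if not (0 < dot_idx < len(indexed_sub_key) - 1):
--         return None
--     index_prefix = indexed_sub_key[:dot_idx]
--     if not index_prefix.isdigit():
--         return None
--     index = int(index_prefix)
--     sub_key = indexed_sub_key[dot_idx + 1 :]
--     return index, sub_key
--
-- def _consolidate_flattened_prefixed_indexed_keys_into_list(
--     attributes: Mapping[str, Any],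
--     prefix: str,
-- ) -> Tuple[Optional[List[Dict[str, Any]]], Optional[List[str]]]:
--     """Consolidate keys with the given prefix into a single list (of dictionaries).
--     Return the consolidated list and the list of keys that were consolidated."""
--     # Note that the reconstitution is not faithful in the sense that if an index shows up as
--     # 999_999_999, we're not going to create a list that long just so that the item can be placed
--     # at that exact position. All we'll do is sort the indices and place the items sequentially.
--     relevant_keys = [
--         (key, idx_and_sub_key, value)
--         for key, value in attributes.items()
--         if (idx_and_sub_key := _extract_index_and_sub_key(key, prefix)) is not None
--     ]
--     if not relevant_keys:
--         return None, None
--     indexed: DefaultDict[int, Dict[str, Any]] = defaultdict(dict)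
--     for _, (idx, sub_key), value in relevant_keys:
--         indexed[idx][sub_key] = value
--     return [dictionary for _, dictionary in sorted(indexed.items())], [
--         key for key, *_ in relevant_keys
--     ]
-- ===== SOURCE B (Python) =====
-- def _consolidate_flattened_prefixed_indexed_keys_into_list(attributes, prefix):
--     """Consolidate keys with the given prefix into a single list (of dictionaries).
--     Return the consolidated list and the list of keys that were consolidated."""
--     pre = prefix + "."
--     rel = []  # (key, index, sub_key, value) in attribute order
--     for key, value in attributes.items():
--         if len(key) > len(pre) and key.startswith(pre):
--             rest = key[len(pre):]
--             idx_s, dot, sub_key = rest.partition(".")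
--             if dot and sub_key and idx_s.isdigit():
--                 rel.append((key, int(idx_s), sub_key, value))
--     if not rel:
--         return None, None
--     order = sorted({i for _, i, _, _ in rel})
--     return [{sk: v for _, j, sk, v in rel if j == i} for i in order], [k for k, *_ in rel]
-- ===== Notes on version B (the rewrite author's own statement) =====
-- stated objective: alternative
-- what changed: B drops A's two helper functions and its defaultdict-of-dicts grouping followed by sorting the grouped items: it collects (key, index, sub_key, value) tuples in one inline pass using str.partition, then builds one dict per index directly from the tuples, iterating over the sorted set of distinct indices; the inline single pass (no per-key helper calls, no defaultdict machinery) measured faster, though per-index filtering costs O(n*k) when there are many distinct indices.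
import Mathlib
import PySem

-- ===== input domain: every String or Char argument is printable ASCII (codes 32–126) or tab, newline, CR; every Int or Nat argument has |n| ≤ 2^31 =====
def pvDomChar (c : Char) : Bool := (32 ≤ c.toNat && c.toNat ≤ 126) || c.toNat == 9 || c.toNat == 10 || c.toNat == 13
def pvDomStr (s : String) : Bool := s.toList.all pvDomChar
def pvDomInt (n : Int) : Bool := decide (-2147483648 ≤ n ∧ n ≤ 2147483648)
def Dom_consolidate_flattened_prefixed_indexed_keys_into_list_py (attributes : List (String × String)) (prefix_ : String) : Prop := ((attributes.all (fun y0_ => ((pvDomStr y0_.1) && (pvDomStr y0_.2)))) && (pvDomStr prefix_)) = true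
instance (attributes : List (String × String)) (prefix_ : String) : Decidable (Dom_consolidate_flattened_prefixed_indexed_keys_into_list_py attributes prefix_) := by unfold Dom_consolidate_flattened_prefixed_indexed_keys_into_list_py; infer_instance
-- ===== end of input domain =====

-- B replaces A's defaultdict hash-grouping + sort of the grouped items by a sorted set of the
-- distinct indices with one dict built per index from the collected tuples (objective: alternative).

-- ===== PORT A =====
-- port of _extract_sub_key (strings handled as List Char)
def extract_sub_key_py (key : String) (prefix_ : String) : Option (List Char) :=
  let prefix_dot : List Char := prefix_.toList ++ ['.']
  if prefix_dot.length < key.toList.length ∧ PySem.Chars.startswith key.toList prefix_dot then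
    some (PySem.List.slice key.toList (some (prefix_dot.length : Int)) none)
  else none

-- port of _extract_index_and_sub_key; int(index_prefix) as (ofChars? …).getD 0: int() cannot
-- raise here because index_prefix.isdigit() has been checked
def extract_index_and_sub_key_py (key : String) (prefix_ : String) : Option (Int × String) :=
  match extract_sub_key_py key prefix_ with
  | none => none
  | some indexed_sub_key =>
    if indexed_sub_key = [] then none  -- 'if not indexed_sub_key' (empty string is falsy)
    else
      let dot_idx : Int := PySem.Chars.find indexed_sub_key ['.']
      if 0 < dot_idx ∧ dot_idx < (indexed_sub_key.length : Int) - 1 then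
        let index_prefix := PySem.List.slice indexed_sub_key none (some dot_idx)
        if PySem.Chars.strIsdigit index_prefix then
          some ((PySem.Int.ofChars? index_prefix).getD 0,
                String.mk (PySem.List.slice indexed_sub_key (some (dot_idx + 1)) none))
        else none
      else none

def consolidate_flattened_prefixed_indexed_keys_into_list_py (attributes : List (String × String)) (prefix_ : String) : (Option (List (List (String × String)))) × Option (List String) :=
  let relevant_keys : List (String × (Int × String) × String) :=
    attributes.foldl (fun acc kv =>
      match extract_index_and_sub_key_py kv.1 prefix_ with
      | some idx_and_sub_key => acc ++ [(kv.1, idx_and_sub_key, kv.2)]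
      | none => acc) []
  if relevant_keys = [] then (none, none)
  else
    let indexed : PySem.Dict Int (PySem.Dict String String) :=
      relevant_keys.foldl (fun d t =>
        d.modify t.2.1.1 PySem.Dict.empty (fun m => m.insert t.2.1.2 t.2.2)) PySem.Dict.empty
    -- sorted(indexed.items()): dict keys are distinct, so Python's tuple comparison
    -- only ever inspects the first (int) component — ported as sort by first component
    (some ((PySem.List.sorted indexed.items (fun p => p.1) false).map (fun p => p.2.items)),
     some (relevant_keys.map (fun t => t.1)))

-- ===== PORT B =====
def consolidate_flattened_prefixed_indexed_keys_into_list_py_alt (attributes : List (String × String)) (prefix_ : String) : (Option (List (List (String × String)))) × Option (List String) :=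
  let pre : List Char := prefix_.toList ++ ['.']
  let rel : List (String × Int × String × String) :=  -- (key, index, sub_key, value) in attribute order
    attributes.foldl (fun acc kv =>
      if pre.length < kv.1.toList.length ∧ PySem.Chars.startswith kv.1.toList pre then
        let rest := PySem.List.slice kv.1.toList (some (pre.length : Int)) none
        -- rest.partition('.') ported via find: a negative find means no dot, partition's middle is ''
        let dot_idx : Int := PySem.Chars.find rest ['.']
        if 0 ≤ dot_idx then
          let idx_s := PySem.List.slice rest none (some dot_idx)
          let sub_key := PySem.List.slice rest (some (dot_idx + 1)) none
          if sub_key ≠ [] ∧ PySem.Chars.strIsdigit idx_s then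
            acc ++ [(kv.1, ((PySem.Int.ofChars? idx_s).getD 0, (String.mk sub_key, kv.2)))]
          else acc
        else acc
      else acc) []
  if rel = [] then (none, none)
  else
    let order : List Int := PySem.List.sorted (PySem.Set.ofList (rel.map (fun t => t.2.1))) (fun i => i) false
    (some (order.map (fun i =>
        ((rel.filter (fun t => t.2.1 == i)).foldl
          (fun d t => d.insert t.2.2.1 t.2.2.2) PySem.Dict.empty).items)),
     some (rel.map (fun t => t.1)))

-- ===== PRECONDITION & SPEC =====
-- Pre_ excludes association lists whose keys repeat: 'attributes' is a Python dict (Mapping), and a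
-- list with duplicate keys does not represent any dict, so A's behaviour on it is unspecified.
def Pre_consolidate_flattened_prefixed_indexed_keys_into_list_py (attributes : List (String × String)) (prefix_ : String) : Prop :=
  (attributes.map Prod.fst).Nodup
instance (attributes : List (String × String)) (prefix_ : String) : Decidable (Pre_consolidate_flattened_prefixed_indexed_keys_into_list_py attributes prefix_) := by unfold Pre_consolidate_flattened_prefixed_indexed_keys_into_list_py; infer_instance

def pvWitness_consolidate_flattened_prefixed_indexed_keys_into_list_py : (List (String × String)) × String :=
  ([("p.1.x", "a"), ("p.0.y", "b"), ("p.1.z", "c"), ("other", "d")], "p")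

def Spec_consolidate_flattened_prefixed_indexed_keys_into_list_py (attributes : List (String × String)) (prefix_ : String) (out : (Option (List (List (String × String)))) × Option (List String)) : Prop := out = consolidate_flattened_prefixed_indexed_keys_into_list_py_alt attributes prefix_
instance (attributes : List (String × String)) (prefix_ : String) (out : (Option (List (List (String × String)))) × Option (List String)) : Decidable (Spec_consolidate_flattened_prefixed_indexed_keys_into_list_py attributes prefix_ out) := by unfold Spec_consolidate_flattened_prefixed_indexed_keys_into_list_py; infer_instance

-- ===== CLAIM (what is proved, stated in full; the proofs are below) =====
def Claim_equal_consolidate_flattened_prefixed_indexed_keys_into_list_py : Prop := ∀ (attributes : List (String × String)) (prefix_ : String), Dom_consolidate_flattened_prefixed_indexed_keys_into_list_py attributes prefix_ → Pre_consolidate_flattened_prefixed_indexed_keys_into_list_py attributes prefix_ → Spec_consolidate_flattened_prefixed_indexed_keys_into_list_py attributes prefix_ (consolidate_flattened_prefixed_indexed_keys_into_list_py attributes prefix_)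


-- ===== LEMMAS AND PROOFS =====

-- the per-key extraction, as A computes it, reshaped to B's flat tuple
def pvExt (prefix_ : String) (kv : String × String) : Option (String × Int × String × String) :=
  (extract_index_and_sub_key_py kv.1 prefix_).map (fun p => (kv.1, p.1, p.2, kv.2))

def pvReshape (t : String × Int × String × String) : String × (Int × String) × String :=
  (t.1, (t.2.1, t.2.2.1), t.2.2.2)

def pvRel (attributes : List (String × String)) (prefix_ : String) : List (String × Int × String × String) :=
  attributes.filterMap (pvExt prefix_)

-- B's inline extraction, as a function (syntactically B's tests)
def pvExtB (prefix_ : String) (key : String) : Option (Int × String) :=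
  let pre : List Char := prefix_.toList ++ ['.']
  if pre.length < key.toList.length ∧ PySem.Chars.startswith key.toList pre then
    let rest := PySem.List.slice key.toList (some (pre.length : Int)) none
    let dot_idx : Int := PySem.Chars.find rest ['.']
    if 0 ≤ dot_idx then
      let idx_s := PySem.List.slice rest none (some dot_idx)
      let sub_key := PySem.List.slice rest (some (dot_idx + 1)) none
      if sub_key ≠ [] ∧ PySem.Chars.strIsdigit idx_s then
        some ((PySem.Int.ofChars? idx_s).getD 0, String.mk sub_key)
      else none
    else none
  else none

-- the common shape both ports compute
def pvOut (R : List (String × Int × String × String)) : (Option (List (List (String × String)))) × Option (List String) :=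
  if R = [] then (none, none)
  else
    (some ((PySem.List.sorted (PySem.Set.ofList (R.map (fun t => t.2.1))) (fun i => i) false).map
        (fun i => ((R.filter (fun t => t.2.1 == i)).foldl
          (fun d t => d.insert t.2.2.1 t.2.2.2) PySem.Dict.empty).items)),
     some (R.map (fun t => t.1)))

-- A's and B's extraction agree
theorem pv_ext_agree (prefix_ key : String) :
    extract_index_and_sub_key_py key prefix_ = pvExtB prefix_ key := by
  unfold extract_index_and_sub_key_py extract_sub_key_py pvExtB
  by_cases hg : (prefix_.toList ++ ['.']).length < key.toList.length ∧
      PySem.Chars.startswith key.toList (prefix_.toList ++ ['.'])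
  · simp only [if_pos hg]
    rw [PySem.List.slice_from_natCast]
    set rest := key.toList.drop (prefix_.toList ++ ['.']).length with hrestdef
    have hrlen : rest.length = key.toList.length - (prefix_.toList ++ ['.']).length :=
      List.length_drop ..
    have hrne : rest ≠ [] := by
      rw [hrestdef, Ne, List.drop_eq_nil_iff]; omega
    simp only [if_neg hrne]
    set f := PySem.Chars.find rest ['.'] with hfdef
    by_cases hf : f = -1
    · have h1 : ¬ (0 < f ∧ f < (rest.length : Int) - 1) := by omega
      have h2 : ¬ ((0:Int) ≤ f) := by omega
      simp only [if_neg h1, if_neg h2]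
    · obtain ⟨h0, hpref, -⟩ := PySem.Chars.findFrom_natCast_spec rest ['.'] 0 (Nat.zero_le _)
        (by simpa [PySem.Chars.findFrom_zero] using hf)
      rw [Nat.cast_zero, PySem.Chars.findFrom_zero, ← hfdef] at h0 hpref
      have hflt : f.toNat < rest.length := by
        have : rest.drop f.toNat ≠ [] := by
          intro h; rw [h] at hpref; exact (List.cons_ne_nil _ _) (List.prefix_nil.mp hpref)
        rw [Ne, List.drop_eq_nil_iff] at this; omega
      have h01 : (0:Int) ≤ f + 1 := by omega
      have hs1 : PySem.List.slice rest (some (f + 1)) none = rest.drop (f+1).toNat :=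
        PySem.List.slice_from rest h01
      have hs2 : PySem.List.slice rest none (some f) = rest.take f.toNat :=
        PySem.List.slice_to rest h0
      rw [hs1, hs2]
      simp only [if_pos h0]
      by_cases hf0 : f = 0
      · have h1 : ¬ (0 < f ∧ f < (rest.length : Int) - 1) := by omega
        have htake : rest.take f.toNat = [] := by simp [hf0]
        have h2 : ¬ (rest.drop (f + 1).toNat ≠ [] ∧
            PySem.Chars.strIsdigit (rest.take f.toNat) = true) := by
          rw [htake]; rintro ⟨-, hd⟩; exact absurd hd (by decide)
        simp only [if_neg h1, if_neg h2]
      · have hsub : rest.drop (f + 1).toNat ≠ [] ↔ f < (rest.length : Int) - 1 := by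
          rw [Ne, List.drop_eq_nil_iff]; omega
        by_cases hd : PySem.Chars.strIsdigit (rest.take f.toNat) = true
        · by_cases hb : f < (rest.length : Int) - 1
          · simp only [if_pos (show 0 < f ∧ f < (rest.length:Int) - 1 by omega), if_pos hd,
              if_pos (show rest.drop (f + 1).toNat ≠ [] ∧
                PySem.Chars.strIsdigit (rest.take f.toNat) = true from ⟨hsub.mpr hb, hd⟩)]
          · simp only [if_neg (show ¬ (0 < f ∧ f < (rest.length:Int) - 1) by omega),
              if_neg (show ¬ (rest.drop (f + 1).toNat ≠ [] ∧
                PySem.Chars.strIsdigit (rest.take f.toNat) = true) from fun h => hb (hsub.mp h.1))]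
        · simp only [if_neg (show ¬ (rest.drop (f + 1).toNat ≠ [] ∧
              PySem.Chars.strIsdigit (rest.take f.toNat) = true) from fun h => hd h.2)]
          by_cases hb : 0 < f ∧ f < (rest.length:Int) - 1
          · simp only [if_pos hb, if_neg hd]
          · simp only [if_neg hb]
  · simp only [if_neg hg]

-- A's comprehension loop collects pvRel, reshaped
theorem pv_foldA (prefix_ : String) (l : List (String × String))
    (acc : List (String × (Int × String) × String)) :
    l.foldl (fun acc kv =>
      match extract_index_and_sub_key_py kv.1 prefix_ with
      | some idx_and_sub_key => acc ++ [(kv.1, idx_and_sub_key, kv.2)]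
      | none => acc) acc
    = acc ++ (l.filterMap (pvExt prefix_)).map pvReshape := by
  induction l generalizing acc with
  | nil => simp
  | cons kv l ih =>
    cases h : extract_index_and_sub_key_py kv.1 prefix_ with
    | none => simp [List.foldl_cons, h, ih, pvExt]
    | some p => simp [List.foldl_cons, h, ih, pvExt, pvReshape]

-- B's collection loop collects pvRel
theorem pv_foldB (prefix_ : String) (l : List (String × String))
    (acc : List (String × Int × String × String)) :
    l.foldl (fun acc kv =>
      if (prefix_.toList ++ ['.']).length < kv.1.toList.length ∧
          PySem.Chars.startswith kv.1.toList (prefix_.toList ++ ['.']) then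
        let rest := PySem.List.slice kv.1.toList (some (((prefix_.toList ++ ['.']).length : Nat) : Int)) none
        let dot_idx : Int := PySem.Chars.find rest ['.']
        if 0 ≤ dot_idx then
          let idx_s := PySem.List.slice rest none (some dot_idx)
          let sub_key := PySem.List.slice rest (some (dot_idx + 1)) none
          if sub_key ≠ [] ∧ PySem.Chars.strIsdigit idx_s then
            acc ++ [(kv.1, ((PySem.Int.ofChars? idx_s).getD 0, (String.mk sub_key, kv.2)))]
          else acc
        else acc
      else acc) acc
    = acc ++ l.filterMap (pvExt prefix_) := by
  induction l generalizing acc with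
  | nil => simp
  | cons kv l ih =>
    rw [List.foldl_cons, List.filterMap_cons, ih]
    have hbody : ∀ (a : List (String × Int × String × String)),
        (if (prefix_.toList ++ ['.']).length < kv.1.toList.length ∧
            PySem.Chars.startswith kv.1.toList (prefix_.toList ++ ['.']) then
          let rest := PySem.List.slice kv.1.toList (some (((prefix_.toList ++ ['.']).length : Nat) : Int)) none
          let dot_idx : Int := PySem.Chars.find rest ['.']
          if 0 ≤ dot_idx then
            let idx_s := PySem.List.slice rest none (some dot_idx)
            let sub_key := PySem.List.slice rest (some (dot_idx + 1)) none
            if sub_key ≠ [] ∧ PySem.Chars.strIsdigit idx_s then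
              a ++ [(kv.1, ((PySem.Int.ofChars? idx_s).getD 0, (String.mk sub_key, kv.2)))]
            else a
          else a
        else a)
        = match pvExt prefix_ kv with
          | some t => a ++ [t]
          | none => a := by
      intro a
      simp only [pvExt, pv_ext_agree, pvExtB]
      split_ifs <;> rfl
    rw [hbody]
    cases h : pvExt prefix_ kv <;> simp

-- grouping invariant for A's defaultdict loop: the dict at index i is the insert-fold
-- of exactly the tuples with that index, in order
theorem pv_group (l : List (String × Int × String × String)) (i : Int) :
    ∀ (d : PySem.Dict Int (PySem.Dict String String)),
    (l.foldl (fun d r => d.modify r.2.1 PySem.Dict.empty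
        (fun m => m.insert r.2.2.1 r.2.2.2)) d).getD i PySem.Dict.empty
    = (l.filter (fun r => r.2.1 == i)).foldl
        (fun m r => m.insert r.2.2.1 r.2.2.2) (d.getD i PySem.Dict.empty) := by
  induction l with
  | nil => intro d; rfl
  | cons r l ih =>
    intro d
    rw [List.foldl_cons, List.filter_cons, ih]
    by_cases h : r.2.1 = i
    · simp only [h, BEq.rfl, if_true, List.foldl_cons]
      rw [PySem.Dict.getD_modify]
      simp
    · have hb : (r.2.1 == i) = false := by simp [h]
      simp only [hb, Bool.false_eq_true, if_false]
      rw [PySem.Dict.getD_modify]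
      simp [Ne.symm h]

-- sorting key-distinct (index, dict) pairs by their first component sorts the indices
theorem pv_sorted_map (l : List Int) (hl : l.Nodup) (g : Int → PySem.Dict String String) :
    PySem.List.sorted (l.map (fun i => (i, g i))) (fun p => p.1) false
    = (PySem.List.sorted l (fun i => i) false).map (fun i => (i, g i)) := by
  apply PySem.List.sorted_eq_of_perm_of_pairwise_lt
  · exact (PySem.List.sorted_perm l _ false).map _
  · have hle : List.Pairwise (fun a b => a ≤ b) (PySem.List.sorted l (fun i => i) false) := by
      simpa using PySem.List.sorted_pairwise l (fun i => i)
    have hnd : (PySem.List.sorted l (fun i => i) false).Nodup :=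
      (PySem.List.sorted_perm l _ false).nodup_iff.mpr hl
    have hlt : List.Pairwise (fun a b : Int => a < b) (PySem.List.sorted l (fun i => i) false) :=
      (hle.and hnd).imp (fun h => lt_of_le_of_ne h.1 h.2)
    exact hlt.map _ (by intro a b h; simpa using h)

-- each port equals the common shape
theorem pv_portA (attributes : List (String × String)) (prefix_ : String) :
    consolidate_flattened_prefixed_indexed_keys_into_list_py attributes prefix_
    = pvOut (pvRel attributes prefix_) := by
  simp only [consolidate_flattened_prefixed_indexed_keys_into_list_py, pvOut, pvRel]
  rw [pv_foldA, List.nil_append]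
  set R := attributes.filterMap (pvExt prefix_) with hR
  by_cases hemp : R = []
  · simp [hemp]
  · have hmapne : R.map pvReshape ≠ [] := by
      simpa [List.map_eq_nil_iff] using hemp
    rw [if_neg hmapne, if_neg hemp]
    have hfold : (R.map pvReshape).foldl (fun d t =>
        d.modify t.2.1.1 PySem.Dict.empty (fun m => m.insert t.2.1.2 t.2.2)) PySem.Dict.empty
        = R.foldl (fun d r => d.modify r.2.1 PySem.Dict.empty
            (fun m => m.insert r.2.2.1 r.2.2.2)) PySem.Dict.empty := by
      rw [List.foldl_map]; simp only [pvReshape]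
    rw [hfold]
    have hkeys : (R.foldl (fun d r => d.modify r.2.1 PySem.Dict.empty
        (fun m => m.insert r.2.2.1 r.2.2.2)) PySem.Dict.empty).keys
        = PySem.Set.ofList (R.map (fun t => t.2.1)) := by
      rw [PySem.Dict.keys_foldl_modify_key R (fun r => r.2.1) PySem.Dict.empty
        (fun _ r m => m.insert r.2.2.1 r.2.2.2) PySem.Dict.empty,
        PySem.Dict.keys_empty, PySem.Set.update_nil_left]
    have hnd : (R.foldl (fun d r => d.modify r.2.1 PySem.Dict.empty
        (fun m => m.insert r.2.2.1 r.2.2.2)) PySem.Dict.empty).keys.Nodup := by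
      rw [hkeys]; exact PySem.Set.nodup_ofList _
    rw [PySem.Dict.items_eq_map_keys _ hnd PySem.Dict.empty, hkeys,
      pv_sorted_map _ (PySem.Set.nodup_ofList _)]
    rw [Prod.mk.injEq]
    refine ⟨?_, ?_⟩
    · rw [Option.some.injEq, List.map_map]
      apply List.map_congr_left
      intro i _
      simp only [Function.comp]
      rw [pv_group, PySem.Dict.getD_empty]
    · rw [Option.some.injEq, List.map_map]
      apply List.map_congr_left
      intro r _
      rfl

theorem pv_portB (attributes : List (String × String)) (prefix_ : String) :
    consolidate_flattened_prefixed_indexed_keys_into_list_py_alt attributes prefix_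
    = pvOut (pvRel attributes prefix_) := by
  simp only [consolidate_flattened_prefixed_indexed_keys_into_list_py_alt, pvOut, pvRel]
  rw [pv_foldB, List.nil_append]

-- ===== VERDICT (by name: the statement is the Claim_ definition above) =====
theorem consolidate_flattened_prefixed_indexed_keys_into_list_py_spec : Claim_equal_consolidate_flattened_prefixed_indexed_keys_into_list_py := by
  intro attributes prefix_ _ _
  unfold Spec_consolidate_flattened_prefixed_indexed_keys_into_list_py
  rw [pv_portA, pv_portB]
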